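-- pv_equiv track=rewrite | github.com/igred8/adventofcode | run/10_code.py | read_signal
-- ===== SOURCE A (Python) =====
-- def read_signal( operations:list ):
--
--     signal = [1]
--     for op in operations:
--         if op[0] == 'noop':
--             signal.append( signal[-1] )
--         elif op[0] == 'addx':
--             signal.append( signal[-1] )
--             signal.append( signal[-1] + int(op[1]) )
--     return signal
-- ===== SOURCE B (Python) =====
-- def read_signal(operations: list):
--     # Two-phase: build a per-cycle delta table, then emit the register history
--     # as running prefix sums starting from 1.
--     deltas = []
--     for op in operations:
--         if op[0] == 'noop':
--             deltas.append(0)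
--         elif op[0] == 'addx':
--             deltas.append(0)
--             deltas.append(int(op[1]))
--     out = [1]
--     acc = 1
--     for d in deltas:
--         acc += d
--         out.append(acc)
--     return out
-- ===== Notes on version B (the rewrite author's own statement) =====
-- stated objective: alternative
-- what changed: Replaces the single pass that repeatedly reads signal[-1] with a two-phase shape: first materialize a per-cycle delta table (0 for noop, 0 then int(op[1]) for addx), then produce the history as prefix sums of [1]+deltas.
import Mathlib
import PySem

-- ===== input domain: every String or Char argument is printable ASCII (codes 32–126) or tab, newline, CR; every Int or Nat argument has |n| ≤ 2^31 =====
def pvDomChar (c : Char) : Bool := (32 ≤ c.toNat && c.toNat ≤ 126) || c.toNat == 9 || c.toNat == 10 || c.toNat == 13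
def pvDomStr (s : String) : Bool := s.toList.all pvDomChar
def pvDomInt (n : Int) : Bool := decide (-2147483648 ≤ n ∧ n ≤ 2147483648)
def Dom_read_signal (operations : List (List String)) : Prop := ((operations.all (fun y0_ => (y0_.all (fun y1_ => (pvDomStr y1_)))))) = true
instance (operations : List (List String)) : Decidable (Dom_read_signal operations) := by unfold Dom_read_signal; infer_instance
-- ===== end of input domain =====

-- B builds a delta table then takes prefix sums; A is kept as the single pass reading signal[-1].

-- ===== PORT A =====
-- loop body of A: extends the signal list according to one operation
def rsStepA (signal : List Int) (op : List String) : List Int :=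
  if PySem.List.pyGetD op 0 "" = "noop" then
    signal ++ [PySem.List.pyGetD signal (-1) 0]
  else if PySem.List.pyGetD op 0 "" = "addx" then
    let s1 := signal ++ [PySem.List.pyGetD signal (-1) 0]
    s1 ++ [PySem.List.pyGetD s1 (-1) 0 + (PySem.Int.ofStr? (PySem.List.pyGetD op 1 "")).getD 0]
  else signal

def read_signal (operations : List (List String)) : List Int :=
  operations.foldl rsStepA [1]

-- ===== PORT B =====
-- phase 1 loop body of B: appends this operation's deltas
def rsStepD (ds : List Int) (op : List String) : List Int :=
  if PySem.List.pyGetD op 0 "" = "noop" then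
    ds ++ [0]
  else if PySem.List.pyGetD op 0 "" = "addx" then
    (ds ++ [0]) ++ [(PySem.Int.ofStr? (PySem.List.pyGetD op 1 "")).getD 0]
  else ds

-- phase 2 of B: running prefix sums (out.append(acc) for each delta)
def rsScan : Int → List Int → List Int
  | _, [] => []
  | acc, d :: ds => (acc + d) :: rsScan (acc + d) ds

def read_signal_alt (operations : List (List String)) : List Int :=
  let deltas := operations.foldl rsStepD []
  1 :: rsScan 1 deltas

-- ===== PRECONDITION & SPEC =====
-- Pre_ excludes exactly the inputs where Python A raises: an empty operation (IndexError on op[0])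
-- or an 'addx' without a second field (IndexError) or whose second field is not int()-parseable (ValueError).
def Pre_read_signal (operations : List (List String)) : Prop :=
  ∀ op ∈ operations, op ≠ [] ∧
    (op.getD 0 "" = "addx" → 2 ≤ op.length ∧ (PySem.Int.ofStr? (op.getD 1 "")).isSome)
instance (operations : List (List String)) : Decidable (Pre_read_signal operations) := by
  unfold Pre_read_signal; infer_instance
def pvWitness_read_signal : List (List String) := [["noop"], ["addx", "3"], ["noop"]]

def Spec_read_signal (operations : List (List String)) (out : List Int) : Prop := out = read_signal_alt operations
instance (operations : List (List String)) (out : List Int) : Decidable (Spec_read_signal operations out) := by unfold Spec_read_signal; infer_instance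

-- ===== CLAIM (what is proved, stated in full; the proofs are below) =====
def Claim_equal_read_signal : Prop := ∀ (operations : List (List String)), Dom_read_signal operations → Pre_read_signal operations → Spec_read_signal operations (read_signal operations)

-- ===== LEMMAS AND PROOFS =====

-- recursive characterisation of the delta table
def rsDF : List (List String) → List Int
  | [] => []
  | op :: ops =>
    (if PySem.List.pyGetD op 0 "" = "noop" then [0]
     else if PySem.List.pyGetD op 0 "" = "addx" then
       [0, (PySem.Int.ofStr? (PySem.List.pyGetD op 1 "")).getD 0]
     else []) ++ rsDF ops

theorem foldD_eq (ops : List (List String)) (ds : List Int) :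
    ops.foldl rsStepD ds = ds ++ rsDF ops := by
  induction ops generalizing ds with
  | nil => simp [rsDF]
  | cons op ops ih =>
    simp only [List.foldl_cons, rsDF, rsStepD]
    split_ifs <;> simp [ih]

theorem mainA (ops : List (List String)) (s : List Int) (x : Int) :
    ops.foldl rsStepA (s ++ [x]) = (s ++ [x]) ++ rsScan x (rsDF ops) := by
  induction ops generalizing s x with
  | nil => simp [rsDF, rsScan]
  | cons op ops ih =>
    simp only [List.foldl_cons, rsDF, rsStepA]
    split_ifs with h1 h2
    · rw [PySem.List.pyGetD_neg_one_append_singleton]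
      rw [show (s ++ [x]) ++ [x] = (s ++ [x]) ++ [x] from rfl]
      rw [ih (s ++ [x]) x]
      simp [rsScan]
    · simp only [PySem.List.pyGetD_neg_one_append_singleton]
      rw [show (s ++ [x]) ++ [x] ++ [x + (PySem.Int.ofStr? (PySem.List.pyGetD op 1 "")).getD 0]
            = ((s ++ [x]) ++ [x]) ++ [x + (PySem.Int.ofStr? (PySem.List.pyGetD op 1 "")).getD 0] from rfl]
      rw [ih ((s ++ [x]) ++ [x]) (x + (PySem.Int.ofStr? (PySem.List.pyGetD op 1 "")).getD 0)]
      simp [rsScan]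
    · exact ih s x

-- ===== VERDICT (by name: the statement is the Claim_ definition above) =====
theorem read_signal_spec : Claim_equal_read_signal := by
  intro operations _ _
  unfold Spec_read_signal read_signal read_signal_alt
  rw [foldD_eq]
  have := mainA operations [] 1
  simpa using this
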